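-- pv_equiv track=rewrite | github.com/dergaj79/python-learning-campus | unit5_funcation/unit5_exercise_5_3_4.py | last_early
-- ===== SOURCE A (Python) =====
-- def last_early(my_str):
--     last_char =my_str[-1]
--     result= False
--     for char in my_str[0:-1]:
--         if (char==last_char):
--             result= True
--             return result
--     return result
-- ===== SOURCE B (Python) =====
-- def last_early(my_str):
--     last_char = my_str[-1]
--     counts = {}
--     for ch in my_str:
--         counts[ch] = counts.get(ch, 0) + 1
--     return counts[last_char] > 1
-- ===== Notes on version B (the rewrite author's own statement) =====
-- stated objective: alternative
-- what changed: Replaces A's early-exit search over the prefix my_str[0:-1] with building a character frequency dictionary over the whole string in one pass and then testing whether the last character's count exceeds 1 (the last position always contributes exactly one occurrence).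
import Mathlib
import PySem

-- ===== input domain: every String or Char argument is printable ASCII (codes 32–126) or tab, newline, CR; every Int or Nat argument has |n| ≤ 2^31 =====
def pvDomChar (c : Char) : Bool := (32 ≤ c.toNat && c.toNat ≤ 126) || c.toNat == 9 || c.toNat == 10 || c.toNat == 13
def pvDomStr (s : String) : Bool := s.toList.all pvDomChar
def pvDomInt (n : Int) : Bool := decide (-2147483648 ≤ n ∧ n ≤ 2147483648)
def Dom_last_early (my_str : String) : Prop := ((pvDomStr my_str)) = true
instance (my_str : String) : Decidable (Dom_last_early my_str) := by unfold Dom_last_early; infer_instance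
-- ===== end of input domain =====

-- B replaces A's early-exit prefix scan with a frequency dictionary built over the whole string, then a lookup of the last character compared with 1 (alternative decomposition; return value only).


-- ===== PORT A =====
-- the for-loop over my_str[0:-1] with the early 'return True'
def lastEarlyLoop (last_char : Char) : List Char → Bool
  | [] => false
  | c :: rest => if c == last_char then true else lastEarlyLoop last_char rest

def last_early (my_str : String) : Bool :=
  match PySem.Str.pyGet? my_str (-1) with
  | none => false   -- IndexError in Python on "", excluded by Pre_
  | some last_char => lastEarlyLoop last_char (PySem.Str.slice my_str (some 0) (some (-1))).toList

-- ===== PORT B =====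
def last_early_alt (my_str : String) : Bool :=
  match PySem.Str.pyGet? my_str (-1) with
  | none => false   -- IndexError in Python on "", excluded by Pre_
  | some last_char =>
    -- counts = {}; for ch in my_str: counts[ch] = counts.get(ch, 0) + 1
    let counts : PySem.Dict Char Int :=
      my_str.toList.foldl (fun d ch => d.insert ch (d.getD ch 0 + 1)) PySem.Dict.empty
    -- counts[last_char]: last_char is in my_str, so the key is present (KeyError impossible)
    decide (counts.getD last_char 0 > 1)

-- ===== PRECONDITION & SPEC =====
-- Pre_ excludes only the empty string, on which Python A raises IndexError at my_str[-1].
def Pre_last_early (my_str : String) : Prop := my_str ≠ ""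
instance (my_str : String) : Decidable (Pre_last_early my_str) := by unfold Pre_last_early; infer_instance
def pvWitness_last_early : String := "ab"

def Spec_last_early (my_str : String) (out : Bool) : Prop := out = last_early_alt my_str
instance (my_str : String) (out : Bool) : Decidable (Spec_last_early my_str out) := by unfold Spec_last_early; infer_instance

-- ===== CLAIM (what is proved, stated in full; the proofs are below) =====
def Claim_equal_last_early : Prop := ∀ (my_str : String), Dom_last_early my_str → Pre_last_early my_str → Spec_last_early my_str (last_early my_str)

-- ===== LEMMAS AND PROOFS =====
theorem lastEarlyLoop_eq_mem (lc : Char) (l : List Char) : lastEarlyLoop lc l = decide (lc ∈ l) := by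
  induction l with
  | nil => simp [lastEarlyLoop]
  | cons x t ih =>
    by_cases hx : x = lc
    · subst hx; simp [lastEarlyLoop]
    · simp [lastEarlyLoop, hx, Ne.symm hx, ih]

theorem last_early_spec : Claim_equal_last_early := by
  intro my_str _ hpre
  unfold Spec_last_early last_early last_early_alt
  have hne : my_str.toList ≠ [] := by
    simpa [String.toList_eq_nil_iff] using hpre
  obtain ⟨init, lc, hs⟩ : ∃ init lc, my_str.toList = init ++ [lc] := by
    rcases List.eq_nil_or_concat' my_str.toList with h | ⟨init, lc, h⟩
    · exact absurd h hne
    · exact ⟨init, lc, h⟩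
  have hget : PySem.Str.pyGet? my_str (-1) = some lc := by
    simp [PySem.Str.pyGet?, hs, PySem.List.pyGet?_neg_one_append_singleton]
  rw [hget]
  have hslice : (PySem.Str.slice my_str (some 0) (some (-1))).toList = init := by
    have := PySem.Str.slice_to_neg_one (s := my_str)
    simpa [hs] using this
  dsimp only
  rw [hslice, lastEarlyLoop_eq_mem, PySem.Dict.foldl_insert_getD_add_one_eq_counter,
    PySem.Dict.getD_counter, hs]
  simp [List.count_append]
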